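-- pv_equiv track=rewrite | github.com/wenderclaytonfilho/multiplicacao-de-matrizes | p2.py | distribute_workload
-- ===== SOURCE A (Python) =====
-- def distribute_workload(rows, cols, num_processes):
--     workload = []
--     step_row = rows // num_processes
--     step_col = cols // num_processes
--
--     for i in range(num_processes):
--         start_row = i * step_row
--         end_row = start_row + step_row if i < num_processes - 1 else rows
--         for j in range(num_processes):
--             start_col = j * step_col
--             end_col = start_col + step_col if j < num_processes - 1 else cols
--             workload.append((start_row, end_row, start_col, end_col))
--
--     return workload
-- ===== SOURCE B (Python) =====
-- def distribute_workload(rows, cols, num_processes):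
--     n = num_processes
--     step_row = rows // n
--     step_col = cols // n
--     row_spans = [(i * step_row, (i + 1) * step_row) for i in range(n - 1)]
--     col_spans = [(j * step_col, (j + 1) * step_col) for j in range(n - 1)]
--     if n > 0:
--         row_spans.append(((n - 1) * step_row, rows))
--         col_spans.append(((n - 1) * step_col, cols))
--     row_stream = []
--     for rs in row_spans:
--         row_stream += [rs] * n
--     col_stream = col_spans * n
--     return [rs + cs for rs, cs in zip(row_stream, col_stream)]
-- ===== Notes on version B (the rewrite author's own statement) =====
-- stated objective: alternative
-- what changed: B computes the two 1-D span tables once, replicates them into two flat parallel streams (each row span repeated n times via list multiplication, the column table repeated n times whole) and zips the streams into the grid, instead of A's nested loops that recompute the row/column boundaries per cell.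
import Mathlib
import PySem

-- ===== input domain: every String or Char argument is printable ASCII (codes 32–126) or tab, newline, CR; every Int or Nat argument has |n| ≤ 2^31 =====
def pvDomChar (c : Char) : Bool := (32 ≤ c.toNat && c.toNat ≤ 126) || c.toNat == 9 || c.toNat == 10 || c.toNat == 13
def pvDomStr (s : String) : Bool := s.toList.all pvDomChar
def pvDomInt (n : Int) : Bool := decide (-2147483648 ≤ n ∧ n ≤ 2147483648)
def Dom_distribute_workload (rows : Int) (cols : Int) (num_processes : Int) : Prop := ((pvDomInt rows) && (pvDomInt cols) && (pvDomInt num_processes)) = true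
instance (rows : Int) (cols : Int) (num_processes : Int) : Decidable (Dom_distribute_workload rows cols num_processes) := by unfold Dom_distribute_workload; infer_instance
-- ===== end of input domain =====

-- B builds the two 1-D span tables once, replicates them into two flat parallel streams
-- ([rs]*n per row span, col_spans*n) and zips them into the grid, instead of A's nested
-- loops that recompute the boundaries per cell; a different construction of the same list.


-- ===== PORT A =====
def distribute_workload (rows : Int) (cols : Int) (num_processes : Int) : List (Int × Int × Int × Int) :=
  let step_row := PySem.Int.floordiv rows num_processes
  let step_col := PySem.Int.floordiv cols num_processes
  (PySem.List.pyRange 0 num_processes 1).foldl (fun workload i =>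
    let start_row := i * step_row
    let end_row := if i < num_processes - 1 then start_row + step_row else rows
    (PySem.List.pyRange 0 num_processes 1).foldl (fun workload j =>
      let start_col := j * step_col
      let end_col := if j < num_processes - 1 then start_col + step_col else cols
      workload ++ [(start_row, end_row, start_col, end_col)]) workload) []

-- ===== PORT B =====
-- Python's '[x] * n' and 'xs * n' (list repetition, empty for n ≤ 0) are ported exactly as
-- 'List.replicate n.toNat x' and '(List.replicate n.toNat xs).flatten'.
def distribute_workload_alt (rows : Int) (cols : Int) (num_processes : Int) : List (Int × Int × Int × Int) :=
  let n := num_processes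
  let step_row := PySem.Int.floordiv rows n
  let step_col := PySem.Int.floordiv cols n
  let row_spans := (PySem.List.pyRange 0 (n - 1) 1).map (fun i => (i * step_row, (i + 1) * step_row))
  let col_spans := (PySem.List.pyRange 0 (n - 1) 1).map (fun j => (j * step_col, (j + 1) * step_col))
  let row_spans := if 0 < n then row_spans ++ [((n - 1) * step_row, rows)] else row_spans
  let col_spans := if 0 < n then col_spans ++ [((n - 1) * step_col, cols)] else col_spans
  let row_stream := row_spans.foldl (fun acc rs => acc ++ List.replicate n.toNat rs) []
  let col_stream := (List.replicate n.toNat col_spans).flatten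
  (row_stream.zip col_stream).map (fun p => (p.1.1, p.1.2, p.2.1, p.2.2))

-- ===== PRECONDITION & SPEC =====
-- Pre_ excludes num_processes = 0, where Python A raises ZeroDivisionError.
def Pre_distribute_workload (rows : Int) (cols : Int) (num_processes : Int) : Prop := num_processes ≠ 0
instance (rows : Int) (cols : Int) (num_processes : Int) : Decidable (Pre_distribute_workload rows cols num_processes) := by unfold Pre_distribute_workload; infer_instance
def pvWitness_distribute_workload : Int × Int × Int := (7, 5, 3)
def Spec_distribute_workload (rows : Int) (cols : Int) (num_processes : Int) (out : List (Int × Int × Int × Int)) : Prop := out = distribute_workload_alt rows cols num_processes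
instance (rows : Int) (cols : Int) (num_processes : Int) (out : List (Int × Int × Int × Int)) : Decidable (Spec_distribute_workload rows cols num_processes out) := by unfold Spec_distribute_workload; infer_instance

-- ===== CLAIM (what is proved, stated in full; the proofs are below) =====
def Claim_equal_distribute_workload : Prop := ∀ (rows : Int) (cols : Int) (num_processes : Int), Dom_distribute_workload rows cols num_processes → Pre_distribute_workload rows cols num_processes → Spec_distribute_workload rows cols num_processes (distribute_workload rows cols num_processes)

-- ===== LEMMAS AND PROOFS =====

-- the span table (short comprehension plus the absorbing last block) is the pointwise
-- if-form A uses inside its loops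
theorem pv_span_eq (n s last : Int) (hn : 0 < n) :
    (PySem.List.pyRange 0 (n - 1) 1).map (fun i => (i * s, (i + 1) * s)) ++ [((n - 1) * s, last)]
      = (PySem.List.pyRange 0 n 1).map (fun i => (i * s, if i < n - 1 then i * s + s else last)) := by
  have h0 : (0 : Int) ≤ n - 1 := by omega
  have hsplit : PySem.List.pyRange 0 n 1 = PySem.List.pyRange 0 (n - 1) 1 ++ [n - 1] := by
    have := PySem.List.pyRange_one_succ_right (a := 0) (b := n - 1) h0
    have hn1 : n - 1 + 1 = n := by ring
    rw [hn1] at this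
    exact this
  rw [hsplit, List.map_append]
  congr 1
  · apply List.map_congr_left
    intro i hi
    have hi' := (PySem.List.mem_pyRange_one).mp hi
    have : i < n - 1 := hi'.2
    simp only [if_pos this]
    exact Prod.ext rfl (by ring)
  · simp

theorem pv_zip_replicate {α β γ : Type} (h : α × β → γ) (a : α) :
    ∀ (ys : List β),
      ((List.replicate ys.length a).zip ys).map h = ys.map (fun y => h (a, y)) := by
  intro ys
  induction ys with
  | nil => rfl
  | cons y t ih => simp [List.replicate_succ, ih]

-- zipping the two replicated flat streams is the row-outer, column-inner grid
theorem pv_zip_rep {ι α β γ : Type} (h : α × β → γ) (fx : ι → α) (N : Nat) (ys : List β)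
    (hy : ys.length = N) :
    ∀ (xs : List ι),
      ((xs.flatMap (fun x => List.replicate N (fx x))).zip
          ((List.replicate xs.length ys).flatten)).map h
        = xs.flatMap (fun x => ys.map (fun y => h (fx x, y))) := by
  intro xs
  induction xs with
  | nil => rfl
  | cons x t ih =>
      rw [List.flatMap_cons, List.length_cons, List.replicate_succ, List.flatten_cons,
          List.zip_append (by simp [hy]), List.map_append, ih, ← hy, pv_zip_replicate,
          List.flatMap_cons]

theorem distribute_workload_eq (rows cols n : Int) (hn : n ≠ 0) :
    distribute_workload rows cols n = distribute_workload_alt rows cols n := by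
  rcases lt_or_gt_of_ne hn with hneg | hpos
  · -- n < 0 : both sides are []
    unfold distribute_workload distribute_workload_alt
    have h1 : n ≤ 0 := le_of_lt hneg
    have h2 : n - 1 ≤ 0 := by omega
    simp [PySem.List.pyRange_one_eq_nil h1, PySem.List.pyRange_one_eq_nil h2, not_lt.mpr h1]
  · -- n > 0
    unfold distribute_workload distribute_workload_alt
    simp only [if_pos hpos, PySem.List.foldl_append_singleton_eq_map,
               PySem.List.foldl_append_eq_flatMap, List.nil_append]
    rw [pv_span_eq n (PySem.Int.floordiv rows n) rows hpos,
        pv_span_eq n (PySem.Int.floordiv cols n) cols hpos]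
    have hlen2 : (PySem.List.pyRange 0 n 1).length = n.toNat := by
      simp [PySem.List.length_pyRange_one]
    rw [List.flatMap_map, ← hlen2]
    refine Eq.trans ?_ (pv_zip_rep
      (h := fun p : (Int × Int) × (Int × Int) => (p.1.1, p.1.2, p.2.1, p.2.2))
      (fx := fun i : Int => (i * PySem.Int.floordiv rows n,
        if i < n - 1 then i * PySem.Int.floordiv rows n + PySem.Int.floordiv rows n else rows))
      (N := (PySem.List.pyRange 0 n 1).length)
      (ys := (PySem.List.pyRange 0 n 1).map (fun j => (j * PySem.Int.floordiv cols n,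
        if j < n - 1 then j * PySem.Int.floordiv cols n + PySem.Int.floordiv cols n else cols)))
      (by simp) (PySem.List.pyRange 0 n 1)).symm
    apply List.flatMap_congr
    intro i _
    rw [List.map_map]
    rfl

-- ===== VERDICT (by name: the statement is the Claim_ definition above) =====
theorem distribute_workload_spec : Claim_equal_distribute_workload := by
  intro rows cols n _ hpre
  exact distribute_workload_eq rows cols n hpre
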